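-- pv_equiv track=rewrite | github.com/GaloisInc/SocialCyberLAGOON | lagoon/fusion/transformations.py | split_and_complete_names
-- ===== SOURCE A (Python) =====
-- def split_and_complete_names(sentence):
--     clauses = sentence.split(' and ')
--     if len(clauses) != 2:
--         return clauses
--     if clauses[-1].startswith(('his','her')):
--         return clauses
--     last_clause_names = clauses[-1].split(' ')
--     for i,name in enumerate(last_clause_names):
--         if i==0:
--             continue
--         if i==len(clauses[0].split(' ')):
--             clauses[0] += f' {name}'
--     return clauses
-- ===== SOURCE B (Python) =====
-- def split_and_complete_names(sentence):
--     clauses = sentence.split(' and ')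
--     if len(clauses) == 2 and not clauses[1].startswith(('his', 'her')):
--         words = clauses[0].split(' ')
--         merged = words + clauses[1].split(' ')[len(words):]
--         return [' '.join(merged), clauses[1]]
--     return clauses
-- ===== Notes on version B (the rewrite author's own statement) =====
-- stated objective: simpler
-- what changed: Instead of a loop that mutates clauses[0] while re-splitting it to match word indices, B merges the two word lists once (first clause's words plus the last clause's words beyond that count) and joins them with spaces.
import Mathlib
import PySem

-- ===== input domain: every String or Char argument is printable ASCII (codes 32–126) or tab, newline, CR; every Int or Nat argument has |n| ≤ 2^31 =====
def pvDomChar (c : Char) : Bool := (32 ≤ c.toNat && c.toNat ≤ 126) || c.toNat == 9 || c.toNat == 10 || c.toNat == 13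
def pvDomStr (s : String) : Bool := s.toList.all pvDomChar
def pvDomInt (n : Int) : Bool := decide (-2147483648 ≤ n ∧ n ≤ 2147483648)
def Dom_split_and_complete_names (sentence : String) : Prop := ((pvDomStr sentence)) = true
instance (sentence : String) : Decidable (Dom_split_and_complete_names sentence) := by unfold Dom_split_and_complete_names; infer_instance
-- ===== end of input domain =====

-- B replaces A's mutating index-matching loop by merging the two word lists once and space-joining (objective: simpler).


-- ===== PORT A =====
def split_and_complete_names (sentence : String) : List String :=
  let clauses := PySem.Chars.splitOn sentence.toList " and ".toList
  if clauses.length ≠ 2 then clauses.map String.ofList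
  else if PySem.Chars.startswith (clauses.getLastD []) "his".toList
       || PySem.Chars.startswith (clauses.getLastD []) "her".toList then
    -- clauses[-1].startswith(('his','her')): return clauses
    clauses.map String.ofList
  else
    let lastClauseNames := PySem.Chars.splitOn (clauses.getLastD []) [' ']
    -- the for-loop mutating clauses[0]; f' {name}' appends ' ' :: name
    let c0' := (PySem.List.enumerate lastClauseNames).foldl
      (fun acc p =>
        if p.1 == 0 then acc
        else if p.1 == ((PySem.Chars.splitOn acc [' ']).length : Int) then acc ++ ' ' :: p.2
        else acc) clauses.headI
    String.ofList c0' :: (clauses.drop 1).map String.ofList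

-- ===== PORT B =====
def split_and_complete_names_alt (sentence : String) : List String :=
  match PySem.Chars.splitOn sentence.toList " and ".toList with
  | [a, b] =>
    if !(PySem.Chars.startswith b "his".toList || PySem.Chars.startswith b "her".toList) then
      -- merged = words + clauses[1].split(' ')[len(words):]; return [' '.join(merged), clauses[1]]
      let words := PySem.Chars.splitOn a [' ']
      let merged := words ++ (PySem.Chars.splitOn b [' ']).drop words.length
      [String.ofList (PySem.Chars.join [' '] merged), String.ofList b]
    else [String.ofList a, String.ofList b]
  | clauses => clauses.map String.ofList

-- ===== PRECONDITION & SPEC =====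
def Spec_split_and_complete_names (sentence : String) (out : List String) : Prop := out = split_and_complete_names_alt sentence
instance (sentence : String) (out : List String) : Decidable (Spec_split_and_complete_names sentence out) := by unfold Spec_split_and_complete_names; infer_instance

-- ===== CLAIM (what is proved, stated in full; the proofs are below) =====
def Claim_equal_split_and_complete_names : Prop := ∀ (sentence : String), Dom_split_and_complete_names sentence → Spec_split_and_complete_names sentence (split_and_complete_names sentence)

-- ===== LEMMAS AND PROOFS =====

/-- Structural single-space split: simple recursion equal to `PySem.Chars.splitOn s [' ']`. -/
def pvSp : List Char → List (List Char)
  | [] => [[]]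
  | c :: rest => if c = ' ' then [] :: pvSp rest else (c :: (pvSp rest).headI) :: (pvSp rest).tail

theorem pvSp_ne_nil (s : List Char) : pvSp s ≠ [] := by
  cases s with
  | nil => simp [pvSp]
  | cons c rest => simp only [pvSp]; split <;> simp

theorem pvGo_eq (fuel : Nat) (l cur : List Char) (acc : List (List Char)) (h : l.length ≤ fuel) :
    PySem.Chars.splitOn.go [' '] fuel l cur acc
      = acc.reverse ++ (pvSp l).modifyHead (cur.reverse ++ ·) := by
  induction fuel generalizing l cur acc with
  | zero =>
    have : l = [] := by cases l <;> simp_all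
    subst this
    simp [PySem.Chars.splitOn.go, pvSp]
  | succ f ih =>
    cases l with
    | nil => simp [PySem.Chars.splitOn.go, pvSp]
    | cons c rest =>
      by_cases hc : c = ' '
      · subst hc
        rw [PySem.Chars.splitOn.go]
        simp only [List.isPrefixOf, beq_self_eq_true, Bool.true_and,
          if_pos, List.length_cons, List.length_nil, List.drop_succ_cons, List.drop_zero]
        rw [ih rest [] (cur.reverse :: acc) (by simpa using h)]
        cases hr : pvSp rest with
        | nil => exact absurd hr (pvSp_ne_nil rest)
        | cons w ws => simp [pvSp, hr]
      · rw [PySem.Chars.splitOn.go]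
        have hpre : [' '].isPrefixOf (c :: rest) = false := by
          simp [List.isPrefixOf]; exact fun h' => hc h'.symm
        simp only [hpre, Bool.false_eq_true, if_false]
        rw [ih rest (c :: cur) acc (by simpa using h)]
        cases hr : pvSp rest with
        | nil => exact absurd hr (pvSp_ne_nil rest)
        | cons w ws => simp [pvSp, hr, hc]

theorem pvSplitOn_eq (s : List Char) : PySem.Chars.splitOn s [' '] = pvSp s := by
  unfold PySem.Chars.splitOn
  rw [pvGo_eq (s.length + 1) s [] [] (by omega)]
  cases hr : pvSp s with
  | nil => exact absurd hr (pvSp_ne_nil s)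
  | cons w ws => simp

theorem pvSp_no_space (s : List Char) : ∀ w ∈ pvSp s, ' ' ∉ w := by
  induction s with
  | nil => intro w hw; simp [pvSp] at hw; subst hw; simp
  | cons c rest ih =>
    intro w hw
    simp only [pvSp] at hw
    split at hw
    case isTrue hc =>
      rcases List.mem_cons.mp hw with h | h
      · subst h; simp
      · exact ih w h
    case isFalse hc =>
      rcases List.mem_cons.mp hw with h | h
      · subst h
        intro hmem
        rcases List.mem_cons.mp hmem with h' | h'
        · exact hc h'.symm
        · cases hr : pvSp rest with
          | nil => exact absurd hr (pvSp_ne_nil rest)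
          | cons w0 ws =>
            have hmemw0 := ih w0 (by rw [hr]; exact List.mem_cons_self ..)
            rw [hr] at h'; exact hmemw0 h'
      · cases hr : pvSp rest with
        | nil => exact absurd hr (pvSp_ne_nil rest)
        | cons w0 ws =>
          rw [hr] at h
          exact ih w (by rw [hr]; exact List.mem_cons_of_mem _ h)

theorem pvSp_of_no_space (w : List Char) (h : ' ' ∉ w) : pvSp w = [w] := by
  induction w with
  | nil => rfl
  | cons c rest ih =>
    have hc : c ≠ ' ' := fun hc => h (by simp [hc])
    have : pvSp rest = [rest] := ih (fun hm => h (List.mem_cons_of_mem _ hm))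
    simp [pvSp, fun h' => hc h', this]

theorem pvSp_append (a b : List Char) : pvSp (a ++ ' ' :: b) = pvSp a ++ pvSp b := by
  induction a with
  | nil => simp [pvSp]
  | cons c a' ih =>
    by_cases hc : c = ' '
    · simp [pvSp, hc, ih]
    · cases hr : pvSp a' with
      | nil => exact absurd hr (pvSp_ne_nil a')
      | cons w ws => simp [pvSp, hc, ih, hr]

theorem pvSp_len_append (a w : List Char) (h : ' ' ∉ w) :
    (pvSp (a ++ ' ' :: w)).length = (pvSp a).length + 1 := by
  rw [pvSp_append, pvSp_of_no_space w h]; simp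

theorem pvJoin_flat (w : List Char) (ws : List (List Char)) :
    ' ' :: PySem.Chars.join [' '] (w :: ws) = (w :: ws).flatMap (fun u => ' ' :: u) := by
  induction ws generalizing w with
  | nil => simp [PySem.Chars.join_singleton]
  | cons v ws' ih =>
    rw [PySem.Chars.join_cons_cons, List.flatMap_cons, ← ih v]
    simp

/-- Joining the single-space split with a single space reconstructs the string. -/
theorem pvJoin_split (s : List Char) : PySem.Chars.join [' '] (pvSp s) = s := by
  induction s with
  | nil => simp [pvSp, PySem.Chars.join_singleton]
  | cons c rest ih =>
    by_cases hc : c = ' '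
    · subst hc
      cases hr : pvSp rest with
      | nil => exact absurd hr (pvSp_ne_nil rest)
      | cons w ws =>
        simp only [pvSp, hr, if_true]
        rw [PySem.Chars.join_cons_cons]
        rw [hr] at ih
        simp [ih]
    · cases hr : pvSp rest with
      | nil => exact absurd hr (pvSp_ne_nil rest)
      | cons w ws =>
        simp only [pvSp, hc, if_false, hr, List.headI, List.tail]
        rw [hr] at ih
        cases ws with
        | nil =>
          rw [PySem.Chars.join_singleton]
          rw [PySem.Chars.join_singleton] at ih
          simp [ih]
        | cons v vs =>
          rw [PySem.Chars.join_cons_cons]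
          rw [PySem.Chars.join_cons_cons] at ih
          simp [← ih]

/-- Joining a nonempty word list followed by extra words appends ' '+word for each extra word. -/
theorem pvJoin_append (ws tail : List (List Char)) (h : ws ≠ []) :
    PySem.Chars.join [' '] (ws ++ tail)
      = PySem.Chars.join [' '] ws ++ tail.flatMap (fun u => ' ' :: u) := by
  induction ws with
  | nil => exact absurd rfl h
  | cons w ws' ih =>
    cases ws' with
    | nil =>
      cases tail with
      | nil => simp
      | cons v ts =>
        simp only [List.nil_append, List.cons_append]
        rw [PySem.Chars.join_cons_cons, PySem.Chars.join_singleton, ← pvJoin_flat v ts]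
        simp
    | cons u ws'' =>
      simp only [List.cons_append]
      rw [PySem.Chars.join_cons_cons, PySem.Chars.join_cons_cons,
        show (u :: ws'') ++ tail = u :: (ws'' ++ tail) from rfl] at *
      rw [show PySem.Chars.join [' '] (u :: (ws'' ++ tail))
            = PySem.Chars.join [' '] (u :: ws'') ++ tail.flatMap (fun x => ' ' :: x) from
          by simpa using ih (by simp)]
      simp

theorem pvFold (ns : List (List Char)) (k : Nat) (acc : List Char)
    (hk1 : 1 ≤ k) (hk2 : k ≤ (pvSp acc).length) (hns : ∀ w ∈ ns, ' ' ∉ w) :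
    (PySem.List.enumerate ns (k : Int)).foldl
      (fun acc p => if p.1 == 0 then acc
        else if p.1 == ((pvSp acc).length : Int) then acc ++ ' ' :: p.2 else acc) acc
    = acc ++ (ns.drop ((pvSp acc).length - k)).flatMap (fun u => ' ' :: u) := by
  induction ns generalizing k acc with
  | nil => simp [PySem.List.enumerate_nil]
  | cons w ns' ih =>
    rw [PySem.List.enumerate_cons]
    simp only [List.foldl_cons]
    have hk0 : ((k : Int) == 0) = false := by simp; omega
    rw [hk0]
    simp only [Bool.false_eq_true, if_false]
    by_cases hkm : k = (pvSp acc).length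
    · have : ((k : Int) == ((pvSp acc).length : Int)) = true := by simp [hkm]
      rw [this]
      simp only [if_pos]
      have hw : ' ' ∉ w := hns w (List.mem_cons_self ..)
      have hlen : (pvSp (acc ++ ' ' :: w)).length = (pvSp acc).length + 1 :=
        pvSp_len_append acc w hw
      have hcast : ((k : Int) + 1) = ((k + 1 : Nat) : Int) := by push_cast; ring
      rw [hcast, ih (k + 1) (acc ++ ' ' :: w) (by omega) (by omega)
        (fun u hu => hns u (List.mem_cons_of_mem _ hu))]
      rw [hlen, hkm]
      simp [List.flatMap_cons]
    · have : ((k : Int) == ((pvSp acc).length : Int)) = false := by simp; exact fun h => hkm (by exact_mod_cast h)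
      rw [this]
      simp only [Bool.false_eq_true, if_false]
      have hcast : ((k : Int) + 1) = ((k + 1 : Nat) : Int) := by push_cast; ring
      rw [hcast, ih (k + 1) acc (by omega) (by omega)
        (fun u hu => hns u (List.mem_cons_of_mem _ hu))]
      have hdrop : (w :: ns').drop ((pvSp acc).length - k) = ns'.drop ((pvSp acc).length - (k + 1)) := by
        have h1 : (pvSp acc).length - k = ((pvSp acc).length - (k + 1)) + 1 := by omega
        rw [h1, List.drop_succ_cons]
      rw [hdrop]

theorem pvMain (s : String) : split_and_complete_names s = split_and_complete_names_alt s := by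
  unfold split_and_complete_names split_and_complete_names_alt
  cases h : PySem.Chars.splitOn s.toList " and ".toList with
  | nil => rfl
  | cons c0 t =>
    cases t with
    | nil => rfl
    | cons c1 t2 =>
      cases t2 with
      | cons x xs =>
        rw [if_pos (by simp)]
      | nil =>
        simp only []
        rw [if_neg (by simp : ¬([c0, c1].length ≠ 2))]
        have hlast : List.getLastD [c0, c1] ([] : List Char) = c1 := rfl
        rw [hlast]
        by_cases hs : (PySem.Chars.startswith c1 "his".toList || PySem.Chars.startswith c1 "her".toList) = true
        · rw [if_pos hs, hs]
          simp
        · rw [if_neg hs]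
          rw [Bool.not_eq_true] at hs
          rw [hs]
          simp only [Bool.not_false, if_pos]
          have hhead : List.headI [c0, c1] = c0 := rfl
          rw [hhead]
          simp only [pvSplitOn_eq]
          cases hn : pvSp c1 with
          | nil => exact absurd hn (pvSp_ne_nil c1)
          | cons w0 rest =>
            rw [PySem.List.enumerate_cons]
            simp only [List.foldl_cons]
            have h0 : ((0 : Int) == 0) = true := by simp
            rw [h0]
            simp only [if_pos]
            have hm1 : 1 ≤ (pvSp c0).length := by
              cases hc : pvSp c0 with
              | nil => exact absurd hc (pvSp_ne_nil c0)
              | cons _ _ => simp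
            have hrest : ∀ w ∈ rest, ' ' ∉ w := fun w hw =>
              pvSp_no_space c1 w (by rw [hn]; exact List.mem_cons_of_mem _ hw)
            rw [show ((0 : Int) + 1) = ((1 : Nat) : Int) by norm_num]
            rw [pvFold rest 1 c0 le_rfl hm1 hrest]
            have hdrop : (w0 :: rest).drop (pvSp c0).length = rest.drop ((pvSp c0).length - 1) := by
              obtain ⟨n, hn'⟩ : ∃ n, (pvSp c0).length = n + 1 := ⟨(pvSp c0).length - 1, by omega⟩
              rw [hn', List.drop_succ_cons]
              simp
            rw [hdrop, pvJoin_append (pvSp c0) _ (pvSp_ne_nil c0), pvJoin_split c0]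
            simp

-- ===== VERDICT (by name: the statement is the Claim_ definition above) =====
theorem split_and_complete_names_spec : Claim_equal_split_and_complete_names := by
  intro s _
  unfold Spec_split_and_complete_names
  exact pvMain s
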